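-- pv_equiv track=rewrite | github.com/astronomer/telescope | telescope/reports_util.py | parse_non_default_configurations
-- ===== SOURCE A (Python) =====
-- from typing import Dict, List, Optional, Union
-- from collections.abc import MutableMapping
--
-- def parse_non_default_configurations(config_report: dict) -> Union[Dict[str, str], MutableMapping]:
--     def flatten_dict(d: MutableMapping, parent_key: str = "", sep: str = ".") -> MutableMapping:
--         items = []
--         for k, v in d.items():
--             new_key = parent_key + sep + k if parent_key else k
--             if isinstance(v, MutableMapping):
--                 items.extend(flatten_dict(v, new_key, sep=sep).items())
--             else:
--                 items.append((new_key, v))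
--         return dict(items)
--
--     new = {k: {ik: iv for ik, iv in v.items() if iv[1] != "default"} for k, v in config_report.items()}
--     filtered = {k: v for k, v in new.items() if len(v)}
--     return flatten_dict(filtered)
-- ===== SOURCE B (Python) =====
-- def parse_non_default_configurations(config_report):
--     # One fused pass: write the flattened "outer.inner" keys of the non-default
--     # entries straight into the result dict (no recursion, no intermediate dicts).
--     result = {}
--     for k, v in config_report.items():
--         for ik, iv in v.items():
--             if iv[1] != "default":
--                 result[k + "." + ik if k else ik] = iv
--     return result
-- ===== Notes on version B (the rewrite author's own statement) =====
-- stated objective: simpler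
-- what changed: Replaces the recursive flatten_dict helper plus the two dict-comprehension passes with one fused double loop that writes result[k + '.' + ik] = iv directly for every non-default entry.
import Mathlib
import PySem

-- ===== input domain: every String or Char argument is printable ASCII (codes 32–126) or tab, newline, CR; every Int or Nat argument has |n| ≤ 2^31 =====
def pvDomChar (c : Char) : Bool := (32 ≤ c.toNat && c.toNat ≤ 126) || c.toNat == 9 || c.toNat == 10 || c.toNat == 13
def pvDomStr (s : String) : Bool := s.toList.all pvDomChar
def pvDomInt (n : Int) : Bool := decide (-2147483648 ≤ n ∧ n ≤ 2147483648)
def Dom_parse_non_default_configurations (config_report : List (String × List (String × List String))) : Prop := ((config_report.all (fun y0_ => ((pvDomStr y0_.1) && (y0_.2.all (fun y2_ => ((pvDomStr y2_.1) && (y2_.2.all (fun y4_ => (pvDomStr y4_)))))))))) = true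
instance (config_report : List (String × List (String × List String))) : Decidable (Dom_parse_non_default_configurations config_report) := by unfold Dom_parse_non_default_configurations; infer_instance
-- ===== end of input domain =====

-- One line: B replaces A's recursive flatten + two comprehension passes with one fused double loop; same return value (objective: simpler).

-- ===== PORT A =====
def parse_non_default_configurations (config_report : List (String × List (String × List String))) : List (String × List String) :=
  -- new = {k: {ik: iv for ik, iv in v.items() if iv[1] != "default"} ...}: each v is a Python
  -- dict, so its item keys are unique and the comprehension's dict is its filtered item list
  let new : List (String × List (String × List String)) :=
    config_report.map (fun kv =>
      (kv.1, kv.2.filter (fun q => PySem.List.pyGetD q.2 1 "" != "default")))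
  -- filtered = {k: v for k, v in new.items() if len(v)}
  let filtered := new.filter (fun p => p.2.length != 0)
  -- flatten_dict(filtered): each value is a mapping whose values are non-mappings, so the
  -- recursion goes exactly one level: items gets (k + "." + ik, iv); dict(items) = Dict.ofList
  -- new_key = parent_key + sep + k if parent_key else k: an empty parent key adds no dot
  let items := filtered.foldl
    (fun acc p => acc ++ p.2.map (fun q => (if p.1 = "" then q.1 else p.1 ++ "." ++ q.1, q.2))) []
  (PySem.Dict.ofList items).items

-- ===== PORT B =====
def parse_non_default_configurations_alt (config_report : List (String × List (String × List String))) : List (String × List String) :=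
  (config_report.foldl
    (fun result kv =>
      kv.2.foldl
        (fun (result : PySem.Dict String (List String)) q =>
          if PySem.List.pyGetD q.2 1 "" != "default"
          then result.insert (if kv.1 = "" then q.1 else kv.1 ++ "." ++ q.1) q.2 else result)
        result)
    PySem.Dict.empty).items

-- ===== PRECONDITION & SPEC =====
-- Pre_ excludes exactly the inputs where some inner value list has fewer than two entries:
-- there Python A (and B alike) raises IndexError on iv[1].
def Pre_parse_non_default_configurations (config_report : List (String × List (String × List String))) : Prop :=
  ∀ p ∈ config_report, ∀ q ∈ p.2, 2 ≤ q.2.length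
instance (config_report : List (String × List (String × List String))) : Decidable (Pre_parse_non_default_configurations config_report) := by unfold Pre_parse_non_default_configurations; infer_instance
def pvWitness_parse_non_default_configurations : (List (String × List (String × List String))) :=
  [("core", [("dags_folder", ["/dags", "env var"]), ("parallelism", ["32", "default"])])]
def Spec_parse_non_default_configurations (config_report : List (String × List (String × List String))) (out : List (String × List String)) : Prop := out = parse_non_default_configurations_alt config_report
instance (config_report : List (String × List (String × List String))) (out : List (String × List String)) : Decidable (Spec_parse_non_default_configurations config_report out) := by unfold Spec_parse_non_default_configurations; infer_instance

-- ===== CLAIM (what is proved, stated in full; the proofs are below) =====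
def Claim_equal_parse_non_default_configurations : Prop := ∀ (config_report : List (String × List (String × List String))), Dom_parse_non_default_configurations config_report → Pre_parse_non_default_configurations config_report → Spec_parse_non_default_configurations config_report (parse_non_default_configurations config_report)

-- ===== LEMMAS AND PROOFS =====

-- Empty-valued pairs contribute nothing to the flattening, so A's `filtered` pass is invisible.
theorem pv_flatMap_filter_len {γ α β : Type} (l : List (γ × List α)) (m : γ × List α → List β)
    (hm : ∀ p : γ × List α, p.2 = [] → m p = []) :
    (l.filter (fun p => p.2.length != 0)).flatMap m = l.flatMap m := by
  induction l with
  | nil => rfl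
  | cons p t ih =>
    cases hnil : p.2 with
    | nil => simp [List.filter_cons, hnil, hm p hnil, ih]
    | cons a u => simp [List.filter_cons, hnil, ih]

-- Folding insert over a concatenation of chunks is the nested loop over the chunks.
theorem pv_foldl_insert_flatMap {α : Type} (l : List α) (m : α → List (String × List String))
    (d : PySem.Dict String (List String)) :
    (l.flatMap m).foldl (fun d p => d.insert p.1 p.2) d
      = l.foldl (fun d x => (m x).foldl (fun d p => d.insert p.1 p.2) d) d := by
  induction l generalizing d with
  | nil => rfl
  | cons x t ih => simp [List.flatMap_cons, List.foldl_append, ih]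

-- ===== VERDICT (by name: the statement is the Claim_ definition above) =====
theorem parse_non_default_configurations_spec : Claim_equal_parse_non_default_configurations := by
  intro cr _ _
  unfold Spec_parse_non_default_configurations parse_non_default_configurations parse_non_default_configurations_alt
  dsimp only
  rw [PySem.List.foldl_append_eq_flatMap, List.nil_append]
  show (PySem.Dict.empty.update _).items = _
  unfold PySem.Dict.update
  rw [pv_flatMap_filter_len _ _ (by intro p hp; simp [hp]), List.flatMap_map,
    pv_foldl_insert_flatMap]
  simp [List.foldl_map, List.foldl_filter]
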